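-- pv_equiv track=rewrite | github.com/pogudo-e/CodeWars | Python/8kyu/PriceOfMangoes/main.py | mango
-- ===== SOURCE A (Python) =====
-- def mango(quantity, price):
--     i = 0
--     res = 0
--     while quantity>0:
--         i += 1
--         if i > 2:
--             res -= price
--             i = 0
--         res += price
--         quantity -= 1
--     return res
-- ===== SOURCE B (Python) =====
-- def mango(quantity, price):
--     q = quantity if quantity > 0 else 0
--     return (q - q // 3) * price
-- ===== Notes on version B (the rewrite author's own statement) =====
-- stated objective: faster
-- what changed: Replaced the per-item while loop (modulo-3 counter, add/subtract of price) by the closed form (q - q//3) * price with q clamped at 0.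
import Mathlib
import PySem

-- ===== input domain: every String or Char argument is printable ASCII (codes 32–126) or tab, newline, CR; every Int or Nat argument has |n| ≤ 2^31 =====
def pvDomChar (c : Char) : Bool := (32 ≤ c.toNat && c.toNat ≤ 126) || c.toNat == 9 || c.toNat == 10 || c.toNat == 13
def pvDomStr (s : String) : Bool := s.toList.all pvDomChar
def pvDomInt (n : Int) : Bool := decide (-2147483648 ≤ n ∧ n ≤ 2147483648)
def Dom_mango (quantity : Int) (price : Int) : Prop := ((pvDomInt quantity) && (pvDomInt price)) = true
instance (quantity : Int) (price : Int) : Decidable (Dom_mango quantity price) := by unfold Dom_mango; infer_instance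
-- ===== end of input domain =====

-- B replaces A's per-item while loop by the closed form (q - q//3) * price; objective: faster (O(1) vs O(quantity)).

-- ===== PORT A =====
-- the while loop of A: state (quantity, i, res); body in source order
def mangoLoop (quantity i res price : Int) : Int :=
  if _h : quantity > 0 then
    let i1 := i + 1
    let p : Int × Int := if i1 > 2 then (res - price, 0) else (res, i1)
    mangoLoop (quantity - 1) p.2 (p.1 + price) price
  else res
termination_by quantity.toNat
decreasing_by omega

def mango (quantity : Int) (price : Int) : Int :=
  mangoLoop quantity 0 0 price

-- ===== PORT B =====
def mango_alt (quantity : Int) (price : Int) : Int :=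
  let q : Int := if quantity > 0 then quantity else 0
  (q - PySem.Int.floordiv q 3) * price

-- ===== PRECONDITION & SPEC =====
def Spec_mango (quantity : Int) (price : Int) (out : Int) : Prop := out = mango_alt quantity price
instance (quantity : Int) (price : Int) (out : Int) : Decidable (Spec_mango quantity price out) := by unfold Spec_mango; infer_instance

-- ===== CLAIM (what is proved, stated in full; the proofs are below) =====
def Claim_equal_mango : Prop := ∀ (quantity : Int) (price : Int), Dom_mango quantity price → Spec_mango quantity price (mango quantity price)

-- ===== LEMMAS AND PROOFS =====

-- loop invariant: with counter i ∈ [0,2], the loop pays for all but every third item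
lemma mangoLoop_eq (n : Nat) : ∀ i res p : Int, 0 ≤ i → i ≤ 2 →
    mangoLoop (n : Int) i res p = res + p * ((n : Int) - ((n : Int) + i) / 3) := by
  induction n with
  | zero =>
    intro i res p h0 h2
    rw [mangoLoop]
    have : ((0 : Nat) : Int) + i = i := by omega
    have hdiv : ((0 : Nat) : Int) + i = i := this
    simp only [Nat.cast_zero]
    have : (0 : Int) + i = i := by ring
    rw [this]
    have : i / 3 = 0 := by omega
    rw [this]
    simp
  | succ n ih =>
    intro i res p h0 h2
    rw [mangoLoop, dif_pos (by positivity : ((n + 1 : Nat) : Int) > 0)]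
    dsimp only
    have hstep : ((n + 1 : Nat) : Int) - 1 = (n : Int) := by push_cast; ring
    by_cases hi : i + 1 > (2 : Int)
    · rw [if_pos hi, hstep]
      have hi2 : i = 2 := by omega
      rw [ih 0 (res - p + p) p (by omega) (by omega)]
      have hd : ((n + 1 : Nat) : Int) + i = (n : Int) + 3 := by push_cast; omega
      rw [hd]
      have h3 : ((n : Int) + 3) / 3 = (n : Int) / 3 + 1 := by omega
      rw [h3]
      push_cast
      ring_nf
    · rw [if_neg hi, hstep]
      rw [ih (i + 1) (res + p) p (by omega) (by omega)]
      have hd : ((n + 1 : Nat) : Int) + i = (n : Int) + (i + 1) := by push_cast; ring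
      rw [hd]
      push_cast
      ring_nf

-- ===== VERDICT (by name: the statement is the Claim_ definition above) =====
theorem mango_spec : Claim_equal_mango := by
  intro quantity price _
  unfold Spec_mango mango mango_alt
  dsimp only
  by_cases hq : quantity > 0
  · have hn : ((quantity.toNat : Nat) : Int) = quantity := by omega
    rw [← hn, mangoLoop_eq quantity.toNat 0 0 price (by omega) (by omega), hn,
        if_pos hq, PySem.Int.floordiv_eq_ediv_of_pos (by omega : (0:Int) < 3)]
    ring_nf
  · rw [mangoLoop, dif_neg hq, if_neg hq]
    simp [PySem.Int.floordiv]
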